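-- pv_equiv track=rewrite | github.com/spyder-ide/spyder | spyder/plugins/editor/extensions/docstring.py | _find_quote_position
-- ===== SOURCE A (Python) =====
-- def _find_quote_position(text):
--     """Return the start and end position of pairs of quotes."""
--     pos = {}
--     is_found_left_quote = False
--     quote = None
--     left_pos = None
--
--     for idx, character in enumerate(text):
--         if not is_found_left_quote:
--             if character in {"'", '"'}:
--                 is_found_left_quote = True
--                 quote = character
--                 left_pos = idx
--         else:
--             if character == quote and text[idx - 1] != '\\':
--                 pos[left_pos] = idx
--                 is_found_left_quote = False
--
--     if is_found_left_quote:
--         raise IndexError(f"No matching close quote at: {left_pos}")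
--
--     return pos
-- ===== SOURCE B (Python) =====
-- def _find_quote_position(text):
--     """Return the start and end position of pairs of quotes."""
--     pos = {}
--     n = len(text)
--     i = 0
--     while i < n:
--         c = text[i]
--         if c in "'\"":
--             # scan for the first unescaped matching close quote
--             j = i + 1
--             while j < n and not (text[j] == c and text[j - 1] != '\\'):
--                 j += 1
--             if j == n:
--                 raise IndexError(f"No matching close quote at: {i}")
--             pos[i] = j
--             i = j + 1
--         else:
--             i += 1
--     return pos
-- ===== Notes on version B (the rewrite author's own statement) =====
-- stated objective: simpler
-- what changed: A's single pass with a three-variable state machine (is_found_left_quote/quote/left_pos) is replaced by an index-jumping outer loop with an inner scan: find an opening quote, scan forward for the first unescaped matching close, record the pair and resume after it — no boolean state is carried.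
import Mathlib
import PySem

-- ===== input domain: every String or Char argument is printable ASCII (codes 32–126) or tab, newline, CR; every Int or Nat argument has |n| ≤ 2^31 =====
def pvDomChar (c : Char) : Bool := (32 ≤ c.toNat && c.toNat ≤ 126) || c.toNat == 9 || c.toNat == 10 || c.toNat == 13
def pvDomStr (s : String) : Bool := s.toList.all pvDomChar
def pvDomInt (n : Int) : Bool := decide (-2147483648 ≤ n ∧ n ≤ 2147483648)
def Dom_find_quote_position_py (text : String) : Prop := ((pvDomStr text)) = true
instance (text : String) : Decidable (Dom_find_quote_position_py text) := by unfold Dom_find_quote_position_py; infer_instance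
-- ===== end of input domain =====

-- B replaces A's one-pass boolean state machine (is_found_left_quote/quote/left_pos) by an
-- outer loop that jumps from opening quote to opening quote with an inner scan finding the
-- matching close; same return value wherever A returns (objective: simpler, no speed claim).

-- ===== PORT A =====
-- one step of A's for-loop over enumerate(text); state = (pos, is_found_left_quote, quote, left_pos)
def aStep (cs : List Char)
    (st : PySem.Dict Int Int × Bool × Option Char × Option Int) (p : Int × Char) :
    PySem.Dict Int Int × Bool × Option Char × Option Int :=
  match st, p with
  | (pos, isFound, quote, leftPos), (idx, character) =>
    if isFound = false then
      if character = '\'' ∨ character = '"' then (pos, true, some character, some idx)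
      else (pos, isFound, quote, leftPos)
    else
      if some character = quote ∧ PySem.List.pyGet? cs (idx - 1) ≠ some '\\' then
        -- left_pos is always set when is_found_left_quote (getD 0 is never read with its default)
        (pos.insert (leftPos.getD 0) idx, false, quote, leftPos)
      else (pos, isFound, quote, leftPos)

def find_quote_position_py (text : String) : List (Int × Int) :=
  let cs := text.toList
  let fin := (PySem.List.enumerate cs 0).foldl (aStep cs)
      ((PySem.Dict.empty : PySem.Dict Int Int), false, (none : Option Char), (none : Option Int))
  -- Python raises IndexError here when fin.2.1 = true; Pre_ excludes exactly those inputs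
  fin.1.items

-- ===== PORT B =====
-- inner while-loop of B: first index j ≥ start with text[j] == q and text[j-1] != '\\';
-- returns the index together with the suffix after it (none = hits end of text, B raises)
def bFindClose (cs : List Char) (q : Char) : List Char → Int → Option (Int × List Char)
  | [], _ => none
  | c :: rest, j =>
    if c = q ∧ PySem.List.pyGet? cs (j - 1) ≠ some '\\' then some (j, rest)
    else bFindClose cs q rest (j + 1)

theorem bFindClose_len (cs : List Char) (q : Char) :
    ∀ (l : List Char) (j j' : Int) (l' : List Char),
      bFindClose cs q l j = some (j', l') → l'.length < l.length := by
  intro l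
  induction l with
  | nil => intro j j' l' h; simp [bFindClose] at h
  | cons c rest ih =>
    intro j j' l' h
    simp only [bFindClose] at h
    split at h
    · cases h; simp
    · exact Nat.lt_trans (ih (j + 1) j' l' h) (by simp)

-- outer while-loop of B over the suffix of text at index i
def bGo (cs : List Char) : List Char → Int → List (Int × Int)
  | [], _ => []
  | c :: rest, i =>
    if c = '\'' ∨ c = '"' then
      match h : bFindClose cs c rest (i + 1) with
      | some (j, rest') => (i, j) :: bGo cs rest' (j + 1)
      | none => []   -- Python B raises IndexError here; Pre_ excludes exactly those inputs
    else bGo cs rest (i + 1)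
termination_by l _ => l.length
decreasing_by
  · exact Nat.lt_trans (bFindClose_len cs c rest (i + 1) j rest' h) (by simp)
  · simp

def find_quote_position_py_alt (text : String) : List (Int × Int) :=
  bGo text.toList text.toList 0

-- ===== PRECONDITION & SPEC =====
-- Pre_ excludes exactly the inputs with a dangling unescaped opening quote, on which the
-- Python A (and B alike) raises IndexError instead of returning.
mutual
-- no unclosed quote when scanning l (prev = character before l's head)
def pvOkClose (q prev : Char) : List Char → Bool
  | [] => false
  | c :: rest => if c = q ∧ prev ≠ '\\' then pvOkScan rest else pvOkClose q c rest
def pvOkScan : List Char → Bool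
  | [] => true
  | c :: rest => if c = '\'' ∨ c = '"' then pvOkClose c c rest else pvOkScan rest
end

def Pre_find_quote_position_py (text : String) : Prop := pvOkScan text.toList = true
instance (text : String) : Decidable (Pre_find_quote_position_py text) := by
  unfold Pre_find_quote_position_py; infer_instance

def pvWitness_find_quote_position_py : String := "say 'hi' and \"b\\\"ye\""

def Spec_find_quote_position_py (text : String) (out : List (Int × Int)) : Prop := out = find_quote_position_py_alt text
instance (text : String) (out : List (Int × Int)) : Decidable (Spec_find_quote_position_py text out) := by unfold Spec_find_quote_position_py; infer_instance

-- ===== CLAIM (what is proved, stated in full; the proofs are below) =====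
def Claim_equal_find_quote_position_py : Prop := ∀ (text : String), Dom_find_quote_position_py text → Pre_find_quote_position_py text → Spec_find_quote_position_py text (find_quote_position_py text)

-- ===== LEMMAS AND PROOFS =====

-- A's fold from the two loop states equals B's two loops, for any suffix l starting at index i.
-- (The ports agree even where Python raises, so no side condition beyond the key bound is needed.)
mutual
theorem aFold_open (cs l : List Char) (i : Int) (q0 : Option Char) (lp0 : Option Int)
    (d : PySem.Dict Int Int) (hk : ∀ k ∈ d.keys, k < i) :
    ((PySem.List.enumerate l i).foldl (aStep cs) (d, false, q0, lp0)).1.items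
      = d.items ++ bGo cs l i := by
  match l with
  | [] => simp [PySem.List.enumerate_nil, bGo]
  | c :: rest =>
    rw [PySem.List.enumerate_cons]
    simp only [List.foldl_cons]
    by_cases hq : c = '\'' ∨ c = '"'
    · have hstep : aStep cs (d, false, q0, lp0) (i, c) = (d, true, some c, some i) := by
        simp [aStep, hq]
      rw [hstep, aFold_close cs rest (i + 1) c i d hk (by omega)]
      simp only [bGo, if_pos hq]
      rcases hfc : bFindClose cs c rest (i + 1) with _ | ⟨j, rest'⟩ <;> simp
    · have hstep : aStep cs (d, false, q0, lp0) (i, c) = (d, false, q0, lp0) := by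
        simp [aStep, hq]
      rw [hstep, aFold_open cs rest (i + 1) q0 lp0 d (fun k hkmem => by
        have := hk k hkmem; omega)]
      simp only [bGo, if_neg hq]
  termination_by l.length
  decreasing_by all_goals simp

theorem aFold_close (cs l : List Char) (i : Int) (q : Char) (lp : Int)
    (d : PySem.Dict Int Int) (hk : ∀ k ∈ d.keys, k < lp) (hlp : lp < i) :
    ((PySem.List.enumerate l i).foldl (aStep cs) (d, true, some q, some lp)).1.items
      = d.items ++ (match bFindClose cs q l i with
          | some (j, rest') => ((lp, j) : Int × Int) :: bGo cs rest' (j + 1)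
          | none => []) := by
  match l with
  | [] => simp [PySem.List.enumerate_nil, bFindClose]
  | c :: rest =>
    rw [PySem.List.enumerate_cons]
    simp only [List.foldl_cons]
    by_cases hc : c = q ∧ PySem.List.pyGet? cs (i - 1) ≠ some '\\'
    · have hstep : aStep cs (d, true, some q, some lp) (i, c)
          = (d.insert lp i, false, some q, some lp) := by
        simp only [aStep]
        rw [if_neg (by simp), if_pos ⟨by simp [hc.1], hc.2⟩]
        rfl
      have hfresh : d.contains lp = false := by
        rw [PySem.Dict.contains_eq_decide_mem_keys]
        simp only [decide_eq_false_iff_not]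
        intro hmem; have := hk lp hmem; omega
      have hk' : ∀ k ∈ (d.insert lp i).keys, k < i + 1 := by
        intro k hkmem
        rcases (PySem.Dict.mem_keys_insert d lp k i).1 hkmem with h | h
        · omega
        · have := hk k h; omega
      rw [hstep, aFold_open cs rest (i + 1) (some q) (some lp) (d.insert lp i) hk']
      rw [PySem.Dict.items_insert_of_not_contains d i hfresh]
      simp only [bFindClose, if_pos hc, List.append_assoc, List.singleton_append]
    · have hstep : aStep cs (d, true, some q, some lp) (i, c)
          = (d, true, some q, some lp) := by
        simp only [aStep]
        rw [if_neg (by simp)]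
        rw [if_neg (by intro h; exact hc ⟨by injection h.1, h.2⟩)]
      rw [hstep, aFold_close cs rest (i + 1) q lp d hk (by omega)]
      simp only [bFindClose, if_neg hc]
  termination_by l.length
  decreasing_by all_goals simp
end

-- ===== VERDICT (by name: the statement is the Claim_ definition above) =====
theorem find_quote_position_py_spec : Claim_equal_find_quote_position_py := by
  intro text _ _
  unfold Spec_find_quote_position_py find_quote_position_py find_quote_position_py_alt
  rw [aFold_open text.toList text.toList 0 none none PySem.Dict.empty (by simp [PySem.Dict.keys_empty])]
  rfl
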